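-- pv_equiv track=rewrite | github.com/SubhPB/leet-code | src/app/2026/contests/C176.py | alternatingXOR
-- ===== SOURCE A (Python) =====
-- from typing import List
--
-- def alternatingXOR(nums: List[int], target1: int, target2: int) -> int:
--     xors={0:[-1]}
--     x=0; M=10**9+7; n=len(nums)
--     add=lambda x,y: (x%M+y%M)%M
--
--     dp=[[0,0] for _ in range(n+1)]
--     dp[-1][1]=1 # dp[n:-1][1:tailendsWithXorEqTarget2] : BASECASE
--
--     for i,num in enumerate(nums):
--         x^=num; left=x^target1
--         # Assuming tail has xor equals target1
--         for j in xors.get(left,[]):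
--             dp[i][0]=add(dp[i][0],dp[j][1])
--
--         left=x^target2
--         # Assuming tail ends having xor equals targte2
--         for j in xors.get(left,[]):
--             dp[i][1]=add(dp[i][1],dp[j][0])
--
--         if x not in xors: xors[x]=[]
--         xors[x].append(i)
--     return add(dp[n-1][0], dp[n-1][1])
-- ===== SOURCE B (Python) =====
-- def alternatingXOR(nums, target1, target2):
--     # One pass: running sums of dp values keyed by prefix-xor, instead of index lists.
--     M = 10**9 + 7
--     sum0 = {}        # prefix-xor -> sum of dp[j][0] over earlier j, mod M
--     sum1 = {0: 1}    # prefix-xor -> sum of dp[j][1]; base dp[-1][1] = 1 at prefix-xor 0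
--     x = 0
--     d0, d1 = 0, 1
--     for num in nums:
--         x ^= num
--         d0 = sum1.get(x ^ target1, 0) % M
--         d1 = sum0.get(x ^ target2, 0) % M
--         sum0[x] = (sum0.get(x, 0) + d0) % M
--         sum1[x] = (sum1.get(x, 0) + d1) % M
--     return (d0 + d1) % M
-- ===== Notes on version B (the rewrite author's own statement) =====
-- stated objective: alternative
-- what changed: Instead of keeping, per prefix-xor, the list of earlier indices and re-summing the dp values over that list at every step, B maintains two dicts holding the running modular sums of dp[j][0] / dp[j][1] keyed by prefix-xor, so each step is a single dict lookup; this removes A's inner loops (quadratic when prefix-xors repeat) but a timing run's random inputs have few repeated prefix-xors, so no speed-up was measured there.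
import Mathlib
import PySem

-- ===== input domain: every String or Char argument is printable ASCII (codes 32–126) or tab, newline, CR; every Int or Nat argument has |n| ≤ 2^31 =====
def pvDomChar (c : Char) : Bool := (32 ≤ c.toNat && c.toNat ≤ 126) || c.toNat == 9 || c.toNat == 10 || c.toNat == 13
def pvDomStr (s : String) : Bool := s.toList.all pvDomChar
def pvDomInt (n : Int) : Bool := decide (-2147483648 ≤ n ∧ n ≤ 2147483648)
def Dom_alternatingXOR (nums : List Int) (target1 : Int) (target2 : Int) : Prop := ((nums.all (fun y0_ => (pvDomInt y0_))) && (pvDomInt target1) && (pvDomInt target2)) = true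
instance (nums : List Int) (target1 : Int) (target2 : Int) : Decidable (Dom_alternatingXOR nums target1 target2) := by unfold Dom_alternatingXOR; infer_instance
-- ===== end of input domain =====

-- B replaces A's per-prefix-xor index lists (whose stored dp values A re-sums at every step)
-- by running modular sums of dp values keyed by prefix-xor, one dict lookup per step.

-- ===== PORT A =====
def pvM : Int := 1000000007

-- add=lambda x,y: (x%M+y%M)%M
def pvAdd (a b : Int) : Int := PySem.Int.mod (PySem.Int.mod a pvM + PySem.Int.mod b pvM) pvM

-- the 'for i,num in enumerate(nums)' loop; state = (xors, x, dp), i the enumerate counter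
-- dp[i] is the only cell the two inner loops write, and they read dp[j] only for j drawn from
-- xors' lists (which never contain i), so folding the cell's value and storing it once is the
-- loops' exact effect on every input
def aLoop (t1 t2 : Int) : List Int → Nat → PySem.Dict Int (List Int) → Int → List (Int × Int) → List (Int × Int)
  | [], _, _, _, dp => dp
  | num :: rest, i, xors, x, dp =>
    let x := PySem.Int.bxor x num
    let l1 := PySem.Int.bxor x t1
    let v0 := (xors.getD l1 []).foldl (fun acc j => pvAdd acc (PySem.List.pyGetD dp j (0, 0)).2)
                (PySem.List.pyGetD dp (i : Int) (0, 0)).1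
    let dp := dp.set i (v0, (PySem.List.pyGetD dp (i : Int) (0, 0)).2)
    let l2 := PySem.Int.bxor x t2
    let v1 := (xors.getD l2 []).foldl (fun acc j => pvAdd acc (PySem.List.pyGetD dp j (0, 0)).1)
                (PySem.List.pyGetD dp (i : Int) (0, 0)).2
    let dp := dp.set i ((PySem.List.pyGetD dp (i : Int) (0, 0)).1, v1)
    let xors := if (xors.get? x).isSome then xors else xors.insert x []
    let xors := xors.insert x (xors.getD x [] ++ [(i : Int)])
    aLoop t1 t2 rest (i + 1) xors x dp

def alternatingXOR (nums : List Int) (target1 : Int) (target2 : Int) : Int :=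
  let n := nums.length
  -- dp=[[0,0] for _ in range(n+1)]; dp[-1][1]=1
  let dp := (List.replicate (n + 1) ((0 : Int), (0 : Int))).set n (0, 1)
  -- xors={0:[-1]}
  let xors : PySem.Dict Int (List Int) := PySem.Dict.ofList [(0, [-1])]
  let dpf := aLoop target1 target2 nums 0 xors 0 dp
  pvAdd (PySem.List.pyGetD dpf ((n : Int) - 1) (0, 0)).1
        (PySem.List.pyGetD dpf ((n : Int) - 1) (0, 0)).2

-- ===== PORT B =====
-- the 'for num in nums' loop of Source B; state = (sum0, sum1, x, d0, d1)
def bLoop (t1 t2 : Int) : List Int → PySem.Dict Int Int → PySem.Dict Int Int → Int → Int → Int → Int × Int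
  | [], _, _, _, d0, d1 => (d0, d1)
  | num :: rest, s0, s1, x, _, _ =>
    let x := PySem.Int.bxor x num
    let d0 := PySem.Int.mod (s1.getD (PySem.Int.bxor x t1) 0) pvM
    let d1 := PySem.Int.mod (s0.getD (PySem.Int.bxor x t2) 0) pvM
    let s0 := s0.insert x (PySem.Int.mod (s0.getD x 0 + d0) pvM)
    let s1 := s1.insert x (PySem.Int.mod (s1.getD x 0 + d1) pvM)
    bLoop t1 t2 rest s0 s1 x d0 d1

def alternatingXOR_alt (nums : List Int) (target1 : Int) (target2 : Int) : Int :=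
  let p := bLoop target1 target2 nums PySem.Dict.empty (PySem.Dict.ofList [(0, 1)]) 0 0 1
  PySem.Int.mod (p.1 + p.2) pvM

-- ===== PRECONDITION & SPEC =====
def Spec_alternatingXOR (nums : List Int) (target1 : Int) (target2 : Int) (out : Int) : Prop := out = alternatingXOR_alt nums target1 target2
instance (nums : List Int) (target1 : Int) (target2 : Int) (out : Int) : Decidable (Spec_alternatingXOR nums target1 target2 out) := by unfold Spec_alternatingXOR; infer_instance

-- ===== CLAIM (what is proved, stated in full; the proofs are below) =====
def Claim_equal_alternatingXOR : Prop := ∀ (nums : List Int) (target1 : Int) (target2 : Int), Dom_alternatingXOR nums target1 target2 → Spec_alternatingXOR nums target1 target2 (alternatingXOR nums target1 target2)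

-- ===== LEMMAS AND PROOFS =====

-- sum of the first components of dp[j] over the index list stored under key k
def pvS0 (dp : List (Int × Int)) (xors : PySem.Dict Int (List Int)) (k : Int) : Int :=
  (((xors.getD k []).map (fun j => (PySem.List.pyGetD dp j ((0 : Int), (0 : Int))).1)).sum)

def pvS1 (dp : List (Int × Int)) (xors : PySem.Dict Int (List Int)) (k : Int) : Int :=
  (((xors.getD k []).map (fun j => (PySem.List.pyGetD dp j ((0 : Int), (0 : Int))).2)).sum)

theorem pvMod_eq (a : Int) : PySem.Int.mod a pvM = a % pvM := by
  exact PySem.Int.mod_eq_emod_of_pos (by norm_num [pvM])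

theorem pvAdd_eq (a b : Int) : pvAdd a b = (a + b) % pvM := by
  simp [pvAdd, pvMod_eq]

theorem fold_pvAdd (f : Int → Int) : ∀ (L : List Int) (a : Int),
    L.foldl (fun acc j => pvAdd acc (f j)) a = if L = [] then a else (a + (L.map f).sum) % pvM := by
  intro L
  induction L with
  | nil => simp
  | cons j t ih =>
    intro a
    simp only [List.foldl_cons, ih, List.map_cons, List.sum_cons]
    by_cases ht : t = []
    · simp [ht, pvAdd_eq]
    · simp only [ht, if_false, List.cons_ne_nil, pvAdd_eq]
      rw [Int.emod_add_emod]
      ring_nf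

theorem fold_pvAdd0 (f : Int → Int) (L : List Int) :
    L.foldl (fun acc j => pvAdd acc (f j)) 0 = (L.map f).sum % pvM := by
  rw [fold_pvAdd]
  split
  · simp [*]
  · simp

-- reading below the written cell (or at -1, i.e. the last cell) is unchanged by set
theorem pyGetD_set_lower (l : List (Int × Int)) (i : Nat) (v d : Int × Int) (j : Int)
    (h1 : -1 ≤ j) (h2 : j < (i : Int)) (h3 : i + 1 < l.length) :
    PySem.List.pyGetD (l.set i v) j d = PySem.List.pyGetD l j d := by
  rcases lt_or_ge j 0 with hj | hj
  · have hj1 : j = -1 := by omega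
    subst hj1
    rw [PySem.List.pyGetD_neg_ofNat _ 1 d (by omega) (by simp; omega),
        PySem.List.pyGetD_neg_ofNat _ 1 d (by omega) (by omega)]
    simp only [List.length_set]
    rw [List.getElem_set_ne (by omega)]
  · have : j = ((j.toNat : Nat) : Int) := by omega
    rw [this, PySem.List.pyGetD_natCast, PySem.List.pyGetD_natCast]
    unfold List.getD
    rw [List.getElem?_set_ne (by omega)]

theorem loop_eq (t1 t2 : Int) : ∀ (rest : List Int) (i : Nat) (xors : PySem.Dict Int (List Int))
    (x : Int) (dp : List (Int × Int)) (s0 s1 : PySem.Dict Int Int) (d0 d1 : Int),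
    dp.length = i + rest.length + 1 →
    (∀ k j, j ∈ xors.getD k [] → -1 ≤ j ∧ j < (i : Int)) →
    (∀ k, s0.getD k 0 = pvS0 dp xors k % pvM) →
    (∀ k, s1.getD k 0 = pvS1 dp xors k % pvM) →
    PySem.List.pyGetD dp ((i : Int) - 1) (0, 0) = (d0, d1) →
    (∀ j : Nat, i ≤ j → j + 1 < dp.length → dp[j]? = some (0, 0)) →
    PySem.List.pyGetD (aLoop t1 t2 rest i xors x dp) ((i : Int) + rest.length - 1) (0, 0)
      = bLoop t1 t2 rest s0 s1 x d0 d1 := by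
  intro rest
  induction rest with
  | nil =>
    intro i xors x dp s0 s1 d0 d1 Hlen H1 H2 H3 H4 H6
    simpa [aLoop, bLoop] using H4
  | cons num r ih =>
    intro i xors x dp s0 s1 d0 d1 Hlen H1 H2 H3 H4 H6
    have hlen2 : i + 1 < dp.length := by simp [Hlen]
    have hilt : i < dp.length := by omega
    have hdpi : PySem.List.pyGetD dp ((i : Nat) : Int) ((0 : Int), (0 : Int)) = (0, 0) := by
      rw [PySem.List.pyGetD_natCast]
      unfold List.getD
      rw [H6 i (le_refl i) (by omega)]
      rfl
    have hdpi1 : (PySem.List.pyGetD dp ((i : Nat) : Int) ((0 : Int), (0 : Int))).1 = 0 := by rw [hdpi]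
    have hdpi2 : (PySem.List.pyGetD dp ((i : Nat) : Int) ((0 : Int), (0 : Int))).2 = 0 := by rw [hdpi]
    simp only [aLoop, bLoop, hdpi1, hdpi2]
    set x' := PySem.Int.bxor x num with hx'def
    set l1 := PySem.Int.bxor x' t1 with hl1def
    set l2 := PySem.Int.bxor x' t2 with hl2def
    set L1 := xors.getD l1 [] with hL1
    set L2 := xors.getD l2 [] with hL2
    set v0 := L1.foldl (fun acc j => pvAdd acc (PySem.List.pyGetD dp j (0, 0)).2) 0 with hv0def
    have hv0 : v0 = pvS1 dp xors l1 % pvM := by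
      rw [hv0def, fold_pvAdd0]; simp [pvS1, hL1]
    set dp1 := dp.set i (v0, 0) with hdp1def
    have hdp1i : PySem.List.pyGetD dp1 ((i : Nat) : Int) ((0 : Int), (0 : Int)) = (v0, 0) := by
      rw [PySem.List.pyGetD_natCast]
      unfold List.getD
      rw [hdp1def, List.getElem?_set_self hilt]
      rfl
    have hdp1i1 : (PySem.List.pyGetD dp1 ((i : Nat) : Int) ((0 : Int), (0 : Int))).1 = v0 := by rw [hdp1i]
    have hdp1i2 : (PySem.List.pyGetD dp1 ((i : Nat) : Int) ((0 : Int), (0 : Int))).2 = 0 := by rw [hdp1i]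
    simp only [hdp1i1, hdp1i2]
    set v1 := L2.foldl (fun acc j => pvAdd acc (PySem.List.pyGetD dp1 j (0, 0)).1) 0 with hv1def
    have hmap2 : L2.map (fun j => (PySem.List.pyGetD dp1 j (0, 0)).1)
        = L2.map (fun j => (PySem.List.pyGetD dp j (0, 0)).1) := by
      apply List.map_congr_left
      intro j hj
      obtain ⟨ha, hb⟩ := H1 l2 j (by rw [← hL2]; exact hj)
      rw [hdp1def, pyGetD_set_lower dp i _ _ j ha hb hlen2]
    have hv1 : v1 = pvS0 dp xors l2 % pvM := by
      rw [hv1def, fold_pvAdd0, hmap2]; simp [pvS0, hL2]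
    set dp2' := dp1.set i (v0, v1) with hdp2def
    have hdp2 : dp2' = dp.set i (v0, v1) := by rw [hdp2def, hdp1def, List.set_set]
    set d0' := PySem.Int.mod (s1.getD l1 0) pvM with hd0'def
    set d1' := PySem.Int.mod (s0.getD l2 0) pvM with hd1'def
    have hd0' : d0' = v0 := by
      rw [hd0'def, pvMod_eq, H3 l1, hv0, Int.emod_emod_of_dvd _ dvd_rfl]
    have hd1' : d1' = v1 := by
      rw [hd1'def, pvMod_eq, H2 l2, hv1, Int.emod_emod_of_dvd _ dvd_rfl]
    set xa := if (xors.get? x').isSome then xors else xors.insert x' [] with hxadef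
    set xors' := xa.insert x' (xa.getD x' [] ++ [(i : Int)]) with hxors'def
    have hxget : ∀ k, xors'.getD k [] = if k = x' then xors.getD x' [] ++ [(i : Int)] else xors.getD k [] := by
      intro k
      by_cases hk : k = x'
      · subst hk
        rw [hxors'def, PySem.Dict.getD_insert_self, if_pos rfl]
        congr 1
        rw [hxadef]
        split
        · rfl
        · rename_i h
          have hnone : xors.get? x' = none := by
            exact Option.not_isSome_iff_eq_none.mp (by simpa using h)
          rw [PySem.Dict.getD_insert_self]
          simp [PySem.Dict.getD, hnone]
      · rw [hxors'def, PySem.Dict.getD_insert_of_ne _ _ _ hk, if_neg hk, hxadef]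
        split
        · rfl
        · rw [PySem.Dict.getD_insert_of_ne _ _ _ hk]
    set s0' := s0.insert x' (PySem.Int.mod (s0.getD x' 0 + d0') pvM) with hs0'def
    set s1' := s1.insert x' (PySem.Int.mod (s1.getD x' 0 + d1') pvM) with hs1'def
    have Hlen' : dp2'.length = (i + 1) + r.length + 1 := by
      rw [hdp2]; simp only [List.length_set, Hlen, List.length_cons]; omega
    have H1' : ∀ k j, j ∈ xors'.getD k [] → -1 ≤ j ∧ j < (((i + 1 : Nat)) : Int) := by
      intro k j hj
      rw [hxget k] at hj
      by_cases hk : k = x'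
      · rw [if_pos hk] at hj
        rcases List.mem_append.mp hj with h | h
        · have := H1 x' j h; push_cast; omega
        · simp at h; subst h; push_cast; omega
      · rw [if_neg hk] at hj
        have := H1 k j hj; push_cast; omega
    have hdp2get : ∀ j : Int, -1 ≤ j → j < (i : Int) →
        PySem.List.pyGetD dp2' j ((0 : Int), (0 : Int)) = PySem.List.pyGetD dp j ((0 : Int), (0 : Int)) := by
      intro j ha hb
      rw [hdp2, pyGetD_set_lower dp i _ _ j ha hb hlen2]
    have hdp2i : PySem.List.pyGetD dp2' ((i : Nat) : Int) ((0 : Int), (0 : Int)) = (v0, v1) := by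
      rw [hdp2, PySem.List.pyGetD_natCast]
      unfold List.getD
      rw [List.getElem?_set_self hilt]
      rfl
    have hmapc1 : ∀ k : Int, (xors.getD k []).map (fun j => (PySem.List.pyGetD dp2' j (0, 0)).1)
        = (xors.getD k []).map (fun j => (PySem.List.pyGetD dp j (0, 0)).1) := by
      intro k
      apply List.map_congr_left
      intro j hj
      obtain ⟨ha, hb⟩ := H1 k j hj
      rw [hdp2get j ha hb]
    have hmapc2 : ∀ k : Int, (xors.getD k []).map (fun j => (PySem.List.pyGetD dp2' j (0, 0)).2)
        = (xors.getD k []).map (fun j => (PySem.List.pyGetD dp j (0, 0)).2) := by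
      intro k
      apply List.map_congr_left
      intro j hj
      obtain ⟨ha, hb⟩ := H1 k j hj
      rw [hdp2get j ha hb]
    have hS0eq : ∀ k, pvS0 dp2' xors' k = (if k = x' then pvS0 dp xors x' + v0 else pvS0 dp xors k) := by
      intro k
      by_cases hk : k = x'
      · subst hk
        unfold pvS0
        rw [hxget x', if_pos rfl, List.map_append, List.sum_append, hmapc1 x']
        simp [hdp2i]
      · simp only [pvS0, hxget k, if_neg hk, hmapc1 k]
    have hS1eq : ∀ k, pvS1 dp2' xors' k = (if k = x' then pvS1 dp xors x' + v1 else pvS1 dp xors k) := by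
      intro k
      by_cases hk : k = x'
      · subst hk
        unfold pvS1
        rw [hxget x', if_pos rfl, List.map_append, List.sum_append, hmapc2 x']
        simp [hdp2i]
      · simp only [pvS1, hxget k, if_neg hk, hmapc2 k]
    have H2' : ∀ k, s0'.getD k 0 = pvS0 dp2' xors' k % pvM := by
      intro k
      by_cases hk : k = x'
      · subst hk
        rw [hs0'def, PySem.Dict.getD_insert_self, hS0eq, if_pos rfl, pvMod_eq, H2 x', hd0',
            Int.emod_add_emod]
      · rw [hs0'def, PySem.Dict.getD_insert_of_ne _ _ _ hk, H2 k, hS0eq, if_neg hk]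
    have H3' : ∀ k, s1'.getD k 0 = pvS1 dp2' xors' k % pvM := by
      intro k
      by_cases hk : k = x'
      · subst hk
        rw [hs1'def, PySem.Dict.getD_insert_self, hS1eq, if_pos rfl, pvMod_eq, H3 x', hd1',
            Int.emod_add_emod]
      · rw [hs1'def, PySem.Dict.getD_insert_of_ne _ _ _ hk, H3 k, hS1eq, if_neg hk]
    have H4' : PySem.List.pyGetD dp2' ((((i + 1 : Nat)) : Int) - 1) ((0 : Int), (0 : Int)) = (d0', d1') := by
      have hc : (((i + 1 : Nat)) : Int) - 1 = ((i : Nat) : Int) := by push_cast; ring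
      rw [hc, hdp2i, hd0', hd1']
    have H6' : ∀ j : Nat, i + 1 ≤ j → j + 1 < dp2'.length → dp2'[j]? = some (0, 0) := by
      intro j hji hjl
      rw [hdp2] at hjl ⊢
      rw [List.getElem?_set_ne (by omega)]
      exact H6 j (by omega) (by simpa using hjl)
    have hidx : (i : Int) + ((num :: r).length : Int) - 1 = (((i + 1 : Nat)) : Int) + (r.length : Int) - 1 := by
      simp only [List.length_cons]; push_cast; omega
    rw [hidx]
    exact ih (i + 1) xors' x' dp2' s0' s1' d0' d1' Hlen' H1' H2' H3' H4' H6'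

-- ===== VERDICT (by name: the statement is the Claim_ definition above) =====
theorem alternatingXOR_spec : Claim_equal_alternatingXOR := by
  intro nums t1 t2 _
  unfold Spec_alternatingXOR
  simp only [alternatingXOR, alternatingXOR_alt]
  have hx0 : ∀ k : Int, (PySem.Dict.ofList [((0 : Int), [(-1 : Int)])]).getD k []
      = if k = 0 then [-1] else [] := by
    intro k
    by_cases h : k = 0
    · subst h
      simp [PySem.Dict.ofList, PySem.Dict.getD, PySem.Dict.get?, PySem.Dict.update,
        PySem.Dict.insert, PySem.Dict.empty]
    · simp [PySem.Dict.ofList, PySem.Dict.getD, PySem.Dict.get?, PySem.Dict.update,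
        PySem.Dict.insert, PySem.Dict.empty, if_neg (Ne.symm h), h]
  have hs1 : ∀ k : Int, (PySem.Dict.ofList [((0 : Int), (1 : Int))]).getD k 0
      = if k = 0 then 1 else 0 := by
    intro k
    by_cases h : k = 0
    · subst h
      simp [PySem.Dict.ofList, PySem.Dict.getD, PySem.Dict.get?, PySem.Dict.update,
        PySem.Dict.insert, PySem.Dict.empty]
    · simp [PySem.Dict.ofList, PySem.Dict.getD, PySem.Dict.get?, PySem.Dict.update,
        PySem.Dict.insert, PySem.Dict.empty, if_neg (Ne.symm h), h]
  have hse : ∀ k : Int, (PySem.Dict.empty : PySem.Dict Int Int).getD k 0 = 0 := by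
    intro k
    simp [PySem.Dict.getD, PySem.Dict.get?, PySem.Dict.empty]
  have hdplen : ((List.replicate (nums.length + 1) ((0 : Int), (0 : Int))).set nums.length
      ((0 : Int), (1 : Int))).length = 0 + nums.length + 1 := by simp
  have hlast : PySem.List.pyGetD ((List.replicate (nums.length + 1) ((0 : Int), (0 : Int))).set
      nums.length ((0 : Int), (1 : Int))) (-1) ((0 : Int), (0 : Int)) = (0, 1) := by
    rw [PySem.List.pyGetD_neg_ofNat _ 1 _ (by omega) (by simp)]
    simp
  have H1 : ∀ k j : Int, j ∈ (PySem.Dict.ofList [((0 : Int), [(-1 : Int)])]).getD k [] →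
      -1 ≤ j ∧ j < (((0 : Nat)) : Int) := by
    intro k j hj
    rw [hx0 k] at hj
    by_cases hk : k = 0
    · rw [if_pos hk] at hj
      simp at hj
      subst hj
      norm_num
    · rw [if_neg hk] at hj
      simp at hj
  have H2 : ∀ k : Int, (PySem.Dict.empty : PySem.Dict Int Int).getD k 0
      = pvS0 ((List.replicate (nums.length + 1) ((0 : Int), (0 : Int))).set nums.length
          ((0 : Int), (1 : Int))) (PySem.Dict.ofList [((0 : Int), [(-1 : Int)])]) k % pvM := by
    intro k
    rw [hse k]
    unfold pvS0
    rw [hx0 k]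
    by_cases hk : k = 0
    · rw [if_pos hk]
      simp [hlast]
    · rw [if_neg hk]
      simp
  have H3 : ∀ k : Int, (PySem.Dict.ofList [((0 : Int), (1 : Int))]).getD k 0
      = pvS1 ((List.replicate (nums.length + 1) ((0 : Int), (0 : Int))).set nums.length
          ((0 : Int), (1 : Int))) (PySem.Dict.ofList [((0 : Int), [(-1 : Int)])]) k % pvM := by
    intro k
    rw [hs1 k]
    unfold pvS1
    rw [hx0 k]
    by_cases hk : k = 0
    · rw [if_pos hk, if_pos hk]
      simp [hlast]
      norm_num [pvM]
    · rw [if_neg hk, if_neg hk]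
      simp
  have H4 : PySem.List.pyGetD ((List.replicate (nums.length + 1) ((0 : Int), (0 : Int))).set
      nums.length ((0 : Int), (1 : Int))) ((((0 : Nat)) : Int) - 1) ((0 : Int), (0 : Int))
      = ((0 : Int), (1 : Int)) := by
    have hc : (((0 : Nat)) : Int) - 1 = -1 := by norm_num
    rw [hc, hlast]
  have H6 : ∀ j : Nat, 0 ≤ j → j + 1 < ((List.replicate (nums.length + 1)
      ((0 : Int), (0 : Int))).set nums.length ((0 : Int), (1 : Int))).length →
      ((List.replicate (nums.length + 1) ((0 : Int), (0 : Int))).set nums.length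
        ((0 : Int), (1 : Int)))[j]? = some (0, 0) := by
    intro j _ hj
    simp only [List.length_set, List.length_replicate] at hj
    rw [List.getElem?_set_ne (by omega), List.getElem?_replicate, if_pos (by omega)]
  have key := loop_eq t1 t2 nums 0 (PySem.Dict.ofList [((0 : Int), [(-1 : Int)])]) 0
    ((List.replicate (nums.length + 1) ((0 : Int), (0 : Int))).set nums.length
      ((0 : Int), (1 : Int)))
    PySem.Dict.empty (PySem.Dict.ofList [((0 : Int), (1 : Int))]) 0 1 hdplen H1 H2 H3 H4 H6
  simp only [Nat.cast_zero, zero_add] at key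
  rw [key, pvAdd_eq, pvMod_eq]
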